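-- pv_equiv track=rewrite | github.com/delmaass/fake-news-climate | utils/utils.py | standardize_date
-- ===== SOURCE A (Python) =====
-- def standardize_date(date) :
--     consecutive_numbers = 0
--     year = ""
--     for c in date :
--         if(ord(c) >= 48 and ord(c) <= 57) :
--             consecutive_numbers+=1
--             year += c
--         else :
--             consecutive_numbers=0
--             year = ""
--         if consecutive_numbers ==  4:
--             return year
--     return ""
-- ===== SOURCE B (Python) =====
-- def standardize_date(date):
--     n = len(date)
--     i = 0
--     while i + 4 <= n:
--         w = date[i:i+4]
--         if all('0' <= ch <= '9' for ch in w):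
--             return w
--         i += 1
--     return ""
-- ===== Notes on version B (the rewrite author's own statement) =====
-- stated objective: simpler
-- what changed: Replaced the running digit-counter with accumulated substring by a sliding 4-char window test over the string, returning the first all-digit window.
import Mathlib
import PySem

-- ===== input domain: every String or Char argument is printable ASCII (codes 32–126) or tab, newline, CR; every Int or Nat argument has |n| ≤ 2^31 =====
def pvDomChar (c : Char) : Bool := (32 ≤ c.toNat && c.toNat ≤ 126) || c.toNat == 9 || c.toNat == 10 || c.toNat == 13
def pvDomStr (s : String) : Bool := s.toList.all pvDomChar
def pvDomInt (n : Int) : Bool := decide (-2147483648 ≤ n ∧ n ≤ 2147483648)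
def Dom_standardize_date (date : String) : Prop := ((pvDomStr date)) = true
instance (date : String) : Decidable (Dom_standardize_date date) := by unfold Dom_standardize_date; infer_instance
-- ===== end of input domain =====

-- B replaces A's running digit-counter/accumulator with a sliding 4-char window test (simpler); same return value everywhere.

-- ===== PORT A =====
-- A's loop: state (consecutive_numbers, year), updated per char, early return when the counter hits 4.
def sdGoA : List Char → Nat → List Char → String
  | [], _, _ => ""
  | c :: rest, cnt, year =>
    let s : Nat × List Char :=
      if 48 ≤ c.toNat ∧ c.toNat ≤ 57 then (cnt + 1, year ++ [c]) else (0, [])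
    if s.1 = 4 then String.ofList s.2 else sdGoA rest s.1 s.2

def standardize_date (date : String) : String := sdGoA date.toList 0 []

-- ===== PORT B =====
-- B's loop: slide a 4-char window; return the first window whose chars are all in '0'..'9'.
def sdGoB : List Char → String
  | c1 :: c2 :: c3 :: c4 :: rest =>
    if ('0' ≤ c1 ∧ c1 ≤ '9') ∧ ('0' ≤ c2 ∧ c2 ≤ '9') ∧ ('0' ≤ c3 ∧ c3 ≤ '9') ∧ ('0' ≤ c4 ∧ c4 ≤ '9')
    then String.ofList [c1, c2, c3, c4]
    else sdGoB (c2 :: c3 :: c4 :: rest)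
  | _ => ""

def standardize_date_alt (date : String) : String := sdGoB date.toList

-- ===== PRECONDITION & SPEC =====
def Spec_standardize_date (date : String) (out : String) : Prop := out = standardize_date_alt date
instance (date : String) (out : String) : Decidable (Spec_standardize_date date out) := by unfold Spec_standardize_date; infer_instance

-- ===== CLAIM (what is proved, stated in full; the proofs are below) =====
def Claim_equal_standardize_date : Prop := ∀ (date : String), Dom_standardize_date date → Spec_standardize_date date (standardize_date date)

-- ===== LEMMAS AND PROOFS =====

lemma sd_digit_iff (c : Char) : ('0' ≤ c ∧ c ≤ '9') ↔ (48 ≤ c.toNat ∧ c.toNat ≤ 57) := by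
  rw [Char.le_def, Char.le_def, UInt32.le_iff_toNat_le, UInt32.le_iff_toNat_le]
  simp only [Char.toNat, show ('0'.val.toNat) = 48 from rfl, show ('9'.val.toNat) = 57 from rfl]

-- a non-digit char at the head kills every window through it
lemma sdGoB_skip0 (c : Char) (rest : List Char) (hc : ¬ ('0' ≤ c ∧ c ≤ '9')) :
    sdGoB (c :: rest) = sdGoB rest := by
  match rest with
  | [] => rfl
  | [x] => rfl
  | [x, y] => rfl
  | x :: y :: z :: t =>
    rw [sdGoB]
    simp only [hc, false_and, if_false]

lemma sdGoB_skip1 (a c : Char) (rest : List Char) (hc : ¬ ('0' ≤ c ∧ c ≤ '9')) :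
    sdGoB (a :: c :: rest) = sdGoB rest := by
  match rest with
  | [] => rfl
  | [x] => rfl
  | x :: y :: t =>
    rw [sdGoB]
    simp only [hc, false_and, and_false, if_false]
    exact sdGoB_skip0 c (x :: y :: t) hc

lemma sdGoB_skip2 (a b c : Char) (rest : List Char) (hc : ¬ ('0' ≤ c ∧ c ≤ '9')) :
    sdGoB (a :: b :: c :: rest) = sdGoB rest := by
  match rest with
  | [] => rfl
  | x :: t =>
    rw [sdGoB]
    simp only [hc, false_and, and_false, if_false]
    exact sdGoB_skip1 b c (x :: t) hc

lemma sdGoB_skip3 (a b d c : Char) (rest : List Char) (hc : ¬ ('0' ≤ c ∧ c ≤ '9')) :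
    sdGoB (a :: b :: d :: c :: rest) = sdGoB rest := by
  rw [sdGoB]
  simp only [hc, and_false, if_false]
  exact sdGoB_skip2 b d c rest hc

-- main invariant: A's state (cnt = year.length, year = current all-digit run, cnt ≤ 3)
lemma sd_main (cs : List Char) : ∀ year : List Char, year.length ≤ 3 →
    (∀ c ∈ year, '0' ≤ c ∧ c ≤ '9') →
    sdGoA cs year.length year = sdGoB (year ++ cs) := by
  induction cs with
  | nil =>
    intro year hlen _
    match year, hlen with
    | [], _ => rfl
    | [a], _ => rfl
    | [a, b], _ => rfl
    | [a, b, c], _ => rfl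
  | cons c rest ih =>
    intro year hlen hdig
    rw [sdGoA]
    by_cases hc : 48 ≤ c.toNat ∧ c.toNat ≤ 57
    · have hc' : '0' ≤ c ∧ c ≤ '9' := (sd_digit_iff c).mpr hc
      rw [if_pos hc]
      dsimp only
      by_cases h4 : year.length + 1 = 4
      · -- run completes: year = [y1,y2,y3]
        have h3 : year.length = 3 := by omega
        match year, h3 with
        | [y1, y2, y3], _ =>
          have d1 := hdig y1 (by simp)
          have d2 := hdig y2 (by simp)
          have d3 := hdig y3 (by simp)
          simp only [List.cons_append, List.nil_append]
          rw [sdGoB]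
          simp [d1, d2, d3, hc']
      · simp only [if_neg h4]
        have hlen' : (year ++ [c]).length ≤ 3 := by
          simp only [List.length_append, List.length_cons, List.length_nil] at *
          omega
        have hdig' : ∀ x ∈ year ++ [c], '0' ≤ x ∧ x ≤ '9' := by
          intro x hx
          rcases List.mem_append.mp hx with h | h
          · exact hdig x h
          · simp at h; subst h; exact hc'
        have := ih (year ++ [c]) hlen' hdig'
        simp only [List.length_append, List.length_cons, List.length_nil] at this
        rw [show year.length + 1 = year.length + (0 + 1) by omega] at h4 ⊢
        rw [this, List.append_assoc]
        rfl
    · have hc' : ¬ ('0' ≤ c ∧ c ≤ '9') := fun h => hc ((sd_digit_iff c).mp h)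
      rw [if_neg hc]
      dsimp only
      rw [show (0 : Nat) = List.length ([] : List Char) from rfl]
      rw [ih [] (by simp) (by simp)]
      simp only [List.nil_append]
      match year, hlen with
      | [], _ => simp [sdGoB_skip0 c rest hc']
      | [a], _ => simp [sdGoB_skip1 a c rest hc']
      | [a, b], _ => simp [sdGoB_skip2 a b c rest hc']
      | [a, b, d], _ => simp [sdGoB_skip3 a b d c rest hc']

-- ===== VERDICT (by name: the statement is the Claim_ definition above) =====
theorem standardize_date_spec : Claim_equal_standardize_date := by
  intro date _
  unfold Spec_standardize_date standardize_date standardize_date_alt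
  have := sd_main date.toList [] (by simp) (by simp)
  simpa using this
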